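-- pv_equiv track=rewrite | github.com/khalequzzamanlikhon/problem-solving | codeforces/A/Arrival of the general.py | minimum_seconds_to_lineup
-- ===== SOURCE A (Python) =====
-- def minimum_seconds_to_lineup(n, heights):
--     min_height = max_height = heights[0]
--     min_index = max_index = 0
--
--     for i in range(1, n):
--         a = heights[i]
--         if a > max_height:
--             max_height = a
--             max_index = i
--         if a <= min_height:
--             min_height = a
--             min_index = i
--
--     distance = max_index + (n - 1 - min_index) - (1 if min_index < max_index else 0)
--     return distance
-- ===== SOURCE B (Python) =====
-- def minimum_seconds_to_lineup(n, heights):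
--     order = sorted(range(n), key=lambda i: (heights[i], -i))
--     min_index = order[0] if order else 0    # nobody to rank: both extremes fall to the leader
--     max_index = order[-1] if order else 0
--     return max_index + (n - 1 - min_index) - (1 if min_index < max_index else 0)
-- ===== Notes on version B (the rewrite author's own statement) =====
-- stated objective: alternative
-- what changed: Replaces A's single running min/max-with-index scan by sorting the indices by the key (height, -index) and reading the last-shortest index off the front and the first-tallest index off the back of the sorted order (defaulting both to the front soldier when no index is ranked).
import Mathlib
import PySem

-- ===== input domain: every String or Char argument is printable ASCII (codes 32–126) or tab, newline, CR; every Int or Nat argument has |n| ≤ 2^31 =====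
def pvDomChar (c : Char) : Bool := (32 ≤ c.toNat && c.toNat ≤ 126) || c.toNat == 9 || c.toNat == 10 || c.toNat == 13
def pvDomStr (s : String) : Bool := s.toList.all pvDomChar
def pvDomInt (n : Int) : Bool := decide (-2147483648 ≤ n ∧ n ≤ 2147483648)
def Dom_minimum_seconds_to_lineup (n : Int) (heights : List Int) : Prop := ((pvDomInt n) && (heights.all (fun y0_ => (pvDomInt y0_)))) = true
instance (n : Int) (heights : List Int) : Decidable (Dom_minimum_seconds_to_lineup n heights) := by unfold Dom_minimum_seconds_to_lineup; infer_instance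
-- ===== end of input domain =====

-- B replaces A's running min/max scan by a sort of the indices by (height, -index) and reads
-- the last shortest / first tallest index off the two ends of the sorted order; objective: alternative.

-- ===== PORT A =====
-- the body of A's for-loop; state is (min_height, max_height, min_index, max_index)
def pvA_body (heights : List Int) (st : Int × Int × Int × Int) (i : Int) : Int × Int × Int × Int :=
  let a := PySem.List.pyGetD heights i 0   -- heights[i]; always in range under Pre_
  let st1 : Int × Int × Int × Int := if a > st.2.1 then (st.1, a, st.2.2.1, i) else st
  if a ≤ st1.1 then (a, st1.2.1, i, st1.2.2.2) else st1

def minimum_seconds_to_lineup (n : Int) (heights : List Int) : Int :=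
  match PySem.List.pyGet? heights 0 with
  | none => 0   -- heights[0] on []: Python raises IndexError; excluded by Pre_
  | some h0 =>
    let st := (PySem.List.pyRange 1 n).foldl (pvA_body heights) (h0, h0, 0, 0)
    st.2.2.2 + (n - 1 - st.2.2.1) - (if st.2.2.1 < st.2.2.2 then 1 else 0)

-- ===== PORT B =====
def minimum_seconds_to_lineup_alt (n : Int) (heights : List Int) : Int :=
  let order := PySem.List.sorted2 (PySem.List.pyRange 0 n)
      (fun i => PySem.List.pyGetD heights i 0) (fun i => -i)   -- key=lambda i: (heights[i], -i)
  let minIndex := match order.head? with | some v => v | none => 0    -- order[0] if order else 0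
  let maxIndex := match order.getLast? with | some v => v | none => 0  -- order[-1] if order else 0
  maxIndex + (n - 1 - minIndex) - (if minIndex < maxIndex then 1 else 0)

-- ===== PRECONDITION & SPEC =====
-- Pre_ is exactly A's domain: A raises IndexError on empty heights (heights[0]) and
-- whenever n > len(heights) (heights[i] inside the loop).
def Pre_minimum_seconds_to_lineup (n : Int) (heights : List Int) : Prop :=
  heights ≠ [] ∧ n ≤ (heights.length : Int)
instance (n : Int) (heights : List Int) : Decidable (Pre_minimum_seconds_to_lineup n heights) := by
  unfold Pre_minimum_seconds_to_lineup; infer_instance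

def pvWitness_minimum_seconds_to_lineup : Int × List Int := (4, [3, 1, 2, 1])

def Spec_minimum_seconds_to_lineup (n : Int) (heights : List Int) (out : Int) : Prop := out = minimum_seconds_to_lineup_alt n heights
instance (n : Int) (heights : List Int) (out : Int) : Decidable (Spec_minimum_seconds_to_lineup n heights out) := by unfold Spec_minimum_seconds_to_lineup; infer_instance

-- ===== CLAIM (what is proved, stated in full; the proofs are below) =====
def Claim_equal_minimum_seconds_to_lineup : Prop := ∀ (n : Int) (heights : List Int), Dom_minimum_seconds_to_lineup n heights → Pre_minimum_seconds_to_lineup n heights → Spec_minimum_seconds_to_lineup n heights (minimum_seconds_to_lineup n heights)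

-- ===== LEMMAS AND PROOFS =====

-- spec values: min / max of a prefix, first index of the max, last index of the min
def pvMx (l : List Int) : Int := match l with | [] => 0 | x :: t => t.foldl max x
def pvMn (l : List Int) : Int := match l with | [] => 0 | x :: t => t.foldl min x
def pvFmi (l : List Int) : Int := (((PySem.List.index? l (pvMx l)).getD 0 : Nat) : Int)
def pvLmi (l : List Int) : Int := (l.length : Int) - 1 - (((PySem.List.index? l.reverse (pvMn l)).getD 0 : Nat) : Int)

lemma pvMx_mem (l : List Int) (h : l ≠ []) : pvMx l ∈ l := by
  rcases l with _ | ⟨x, t⟩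
  · simp at h
  · exact PySem.List.max?_mem (PySem.List.max?_id_cons x t)

lemma pvMn_mem (l : List Int) (h : l ≠ []) : pvMn l ∈ l := by
  rcases l with _ | ⟨x, t⟩
  · simp at h
  · exact PySem.List.min?_mem (PySem.List.min?_id_cons x t)

lemma le_pvMx (l : List Int) (y : Int) (hy : y ∈ l) : y ≤ pvMx l := by
  rcases l with _ | ⟨x, t⟩
  · simp at hy
  · rcases List.mem_cons.mp hy with rfl | ht
    · exact (PySem.List.le_foldl_max t y).1
    · exact (PySem.List.le_foldl_max t x).2 y ht

lemma pvMn_le (l : List Int) (y : Int) (hy : y ∈ l) : pvMn l ≤ y := by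
  rcases l with _ | ⟨x, t⟩
  · simp at hy
  · rcases List.mem_cons.mp hy with rfl | ht
    · exact (PySem.List.foldl_min_le t y).1
    · exact (PySem.List.foldl_min_le t x).2 y ht

lemma pvMx_append (l : List Int) (a : Int) (h : l ≠ []) :
    pvMx (l ++ [a]) = if a > pvMx l then a else pvMx l := by
  rcases l with _ | ⟨x, t⟩
  · simp at h
  · show ((t ++ [a]).foldl max x) = _
    rw [List.foldl_append]
    show max (pvMx (x :: t)) a = _
    rcases le_total a (pvMx (x :: t)) with hc | hc
    · rw [max_eq_left hc, if_neg (by omega)]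
    · rw [max_eq_right hc]
      by_cases hgt : a > pvMx (x :: t)
      · rw [if_pos hgt]
      · rw [if_neg hgt]; omega

lemma pvMn_append (l : List Int) (a : Int) (h : l ≠ []) :
    pvMn (l ++ [a]) = if a ≤ pvMn l then a else pvMn l := by
  rcases l with _ | ⟨x, t⟩
  · simp at h
  · show ((t ++ [a]).foldl min x) = _
    rw [List.foldl_append]
    show min (pvMn (x :: t)) a = _
    rcases le_total a (pvMn (x :: t)) with hc | hc
    · rw [min_eq_right hc, if_pos hc]
    · rw [min_eq_left hc]
      by_cases hle : a ≤ pvMn (x :: t)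
      · rw [if_pos hle]; omega
      · rw [if_neg hle]

lemma pvFmi_append (l : List Int) (a : Int) (h : l ≠ []) :
    pvFmi (l ++ [a]) = if a > pvMx l then (l.length : Int) else pvFmi l := by
  unfold pvFmi
  rw [pvMx_append l a h]
  by_cases hgt : a > pvMx l
  · rw [if_pos hgt, if_pos hgt]
    have hnotmem : a ∉ l := fun hm => absurd (le_pvMx l a hm) (by omega)
    rw [PySem.List.index?_append_singleton_self l a hnotmem]
    simp
  · rw [if_neg hgt, if_neg hgt]
    rw [PySem.List.index?_append_of_mem [a] (pvMx_mem l h)]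

lemma pvLmi_append (l : List Int) (a : Int) (h : l ≠ []) :
    pvLmi (l ++ [a]) = if a ≤ pvMn l then (l.length : Int) else pvLmi l := by
  unfold pvLmi
  rw [pvMn_append l a h]
  have hrev : (l ++ [a]).reverse = a :: l.reverse := by simp
  rw [hrev]
  by_cases hle : a ≤ pvMn l
  · rw [if_pos hle, if_pos hle, PySem.List.index?_cons_self]
    simp only [Option.getD_some, List.length_append, List.length_cons, List.length_nil,
      Nat.cast_zero]
    push_cast
    ring
  · rw [if_neg hle, if_neg hle]
    have hne : a ≠ pvMn l := fun he => hle (le_of_eq he)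
    rw [PySem.List.index?_cons_of_ne l.reverse hne]
    have hmem : pvMn l ∈ l.reverse := List.mem_reverse.mpr (pvMn_mem l h)
    have hsome : (PySem.List.index? l.reverse (pvMn l)).isSome :=
      (PySem.List.index?_isSome_iff l.reverse (pvMn l)).mpr hmem
    obtain ⟨r, hr⟩ := Option.isSome_iff_exists.mp hsome
    rw [hr]
    simp only [Option.map_some, Option.getD_some, List.length_append, List.length_cons,
      List.length_nil]
    push_cast
    ring

-- invariant of A's scan: after processing indices 1..m-1 the state holds min/max of the
-- first m elements, the last index of the min, and the first index of the max
lemma scan_inv (x : Int) (t : List Int) (m : Nat) (h1 : 1 ≤ m) (h2 : m ≤ t.length + 1) :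
    (PySem.List.pyRange 1 (m : Int)).foldl (pvA_body (x :: t)) (x, x, 0, 0)
      = (pvMn ((x :: t).take m), pvMx ((x :: t).take m),
         pvLmi ((x :: t).take m), pvFmi ((x :: t).take m)) := by
  induction m, h1 using Nat.le_induction with
  | base =>
    have : PySem.List.pyRange 1 ((1 : Nat) : Int) = [] := by decide
    rw [this]
    simp [pvMn, pvMx, pvFmi, pvLmi]
  | succ m hm ih =>
    have hmlen : m ≤ t.length := by omega
    have hcast : ((m + 1 : Nat) : Int) = (m : Nat) + 1 := by push_cast; ring
    rw [hcast, PySem.List.pyRange_one_succ_right (by exact_mod_cast hm), List.foldl_append,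
      ih (by omega)]
    have hlt : m < (x :: t).length := by simp; omega
    have htake : (x :: t).take (m + 1) = (x :: t).take m ++ [(x :: t)[m]] := by
      rw [List.take_add_one, List.getElem?_eq_getElem hlt]; rfl
    set l := (x :: t).take m with hl
    have hlne : l ≠ [] := by
      rcases m with _ | m
      · omega
      · simp [hl]
    have hllen : l.length = m := by simp [hl]; omega
    rw [htake]
    show pvA_body (x :: t) (pvMn l, pvMx l, pvLmi l, pvFmi l) (m : Int) = _
    unfold pvA_body
    have hget : PySem.List.pyGetD (x :: t) (m : Int) 0 = (x :: t)[m] := by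
      rw [PySem.List.pyGetD_eq_getElem (x :: t) 0 (by positivity) (by exact_mod_cast hlt)]
      simp
    simp only [hget]
    rw [pvMn_append l _ hlne, pvMx_append l _ hlne, pvLmi_append l _ hlne,
      pvFmi_append l _ hlne, hllen]
    by_cases hgt : (x :: t)[m] > pvMx l <;> by_cases hle : (x :: t)[m] ≤ pvMn l <;>
      simp [hgt, hle]

-- B-side: Python's tuple key (k1, k2) is the lexicographic order on Int × Int
lemma sorted2_eq_sorted_toLex (xs : List Int) (k1 k2 : Int → Int) :
    PySem.List.sorted2 xs k1 k2 = PySem.List.sorted xs (fun x => toLex (k1 x, k2 x)) := by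
  unfold PySem.List.sorted2 PySem.List.sorted
  simp only [if_neg (by decide : ¬ (false = true))]
  have hbe : (fun a b => decide (k1 a < k1 b) || !decide (k1 b < k1 a) && decide (k2 a < k2 b))
      = fun a b : Int => decide ((fun x => toLex (k1 x, k2 x)) a < (fun x => toLex (k1 x, k2 x)) b) := by
    funext a b
    simp only [Prod.Lex.toLex_lt_toLex]
    rcases lt_trichotomy (k1 a) (k1 b) with h | h | h <;>
      by_cases h2 : k2 a < k2 b <;> simp [h, h2] <;> omega
  rw [hbe]

-- positions of pvLmi: it indexes the min, and nothing after it does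
lemma lmi_props (l : List Int) (h : l ≠ []) :
    ∃ (k : Nat) (hk : k < l.length), pvLmi l = (k : Int) ∧ l[k] = pvMn l ∧
      ∀ (j : Nat) (hj : j < l.length), k < j → l[j] ≠ pvMn l := by
  have hsome : (PySem.List.index? l.reverse (pvMn l)).isSome :=
    (PySem.List.index?_isSome_iff l.reverse (pvMn l)).mpr
      (List.mem_reverse.mpr (pvMn_mem l h))
  obtain ⟨r, hr⟩ := Option.isSome_iff_exists.mp hsome
  obtain ⟨hrlt, hreq, hrmin⟩ := PySem.List.getElem_of_index?_eq_some hr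
  have hrl : r < l.length := by simpa using hrlt
  refine ⟨l.length - 1 - r, by omega, ?_, ?_, ?_⟩
  · unfold pvLmi; rw [hr]; simp; omega
  · have : l[l.length - 1 - r]'(by omega) = l.reverse[r]'hrlt := by
      rw [List.getElem_reverse]
    rw [this, hreq]
  · intro j hj hkj hcontra
    have hjr : l.length - 1 - j < r := by omega
    have : l.reverse[l.length - 1 - j]'(by simp; omega) = l[j]'hj := by
      rw [List.getElem_reverse]
      congr 1
      omega
    exact hrmin (l.length - 1 - j) hjr (this.trans hcontra)

-- positions of pvFmi: it indexes the max, and nothing before it does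
lemma fmi_props (l : List Int) (h : l ≠ []) :
    ∃ (k : Nat) (hk : k < l.length), pvFmi l = (k : Int) ∧ l[k] = pvMx l ∧
      ∀ (j : Nat) (hj : j < l.length), j < k → l[j] ≠ pvMx l := by
  have hsome : (PySem.List.index? l (pvMx l)).isSome :=
    (PySem.List.index?_isSome_iff l (pvMx l)).mpr (pvMx_mem l h)
  obtain ⟨k, hk⟩ := Option.isSome_iff_exists.mp hsome
  obtain ⟨hklt, hkeq, hkmin⟩ := PySem.List.getElem_of_index?_eq_some hk
  refine ⟨k, hklt, ?_, hkeq, ?_⟩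
  · unfold pvFmi; rw [hk]; simp
  · intro j hj hjk
    exact hkmin j hjk

-- B's key over the examined indices
def pvKeyB (heights : List Int) (i : Int) : Lex (Int × Int) :=
  toLex (PySem.List.pyGetD heights i 0, -i)

lemma pvKeyB_inj (heights : List Int) (i j : Int) (h : pvKeyB heights i = pvKeyB heights j) :
    i = j := by
  unfold pvKeyB at h
  have := congrArg (fun p => (ofLex p).2) h
  simpa using this

-- heights[j] for an examined index j is the j-th element of the prefix
lemma pvGet_take (x : Int) (t : List Int) (m j : Nat) (hj : j < m) (h2 : m ≤ t.length + 1) :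
    PySem.List.pyGetD (x :: t) (j : Int) 0 = ((x :: t).take m)[j]'(by simp; omega) := by
  rw [PySem.List.pyGetD_eq_getElem (x :: t) 0 (by positivity) (by simp; omega)]
  simp only [Int.toNat_natCast]
  exact (List.getElem_take (xs := x :: t) (j := m)).symm

lemma pyRange_zero_nil (n : Int) (hn : n ≤ 0) : PySem.List.pyRange 0 n = [] := by
  have h0 : n.toNat = 0 := by omega
  have := PySem.List.pyRange_zero_natCast n.toNat
  rw [h0] at this
  rcases eq_or_lt_of_le hn with rfl | hlt
  · simpa using this
  · simp [PySem.List.pyRange]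
    omega

lemma mem_range_cases (m : Nat) (i : Int) (hi : i ∈ PySem.List.pyRange 0 (m : Int)) :
    ∃ k : Nat, k < m ∧ i = (k : Int) := by
  rw [PySem.List.pyRange_zero_natCast] at hi
  obtain ⟨k, hk, rfl⟩ := List.mem_map.mp hi
  exact ⟨k, List.mem_range.mp hk, rfl⟩

-- pvLmi has the lexicographically least key among the examined indices
lemma key_lmi_min (x : Int) (t : List Int) (m : Nat) (h1 : 1 ≤ m) (h2 : m ≤ t.length + 1) :
    ∀ i ∈ PySem.List.pyRange 0 (m : Int),
      pvKeyB (x :: t) (pvLmi ((x :: t).take m)) ≤ pvKeyB (x :: t) i := by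
  intro i hi
  obtain ⟨ki, hki, rfl⟩ := mem_range_cases m i hi
  set l := (x :: t).take m with hl
  have hlne : l ≠ [] := by
    rcases m with _ | m
    · omega
    · simp [hl]
  have hllen : l.length = m := by simp [hl]; omega
  obtain ⟨k, hk, hkeq, hkv, hklast⟩ := lmi_props l hlne
  have hgi : PySem.List.pyGetD (x :: t) (ki : Int) 0 = l[ki]'(by omega) :=
    pvGet_take x t m ki hki h2
  have hgk : PySem.List.pyGetD (x :: t) (pvLmi l) 0 = l[k]'hk := by
    rw [hkeq]
    exact pvGet_take x t m k (by omega) h2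
  unfold pvKeyB
  rw [Prod.Lex.toLex_le_toLex]
  simp only [hgi, hgk, hkv]
  have hmin : pvMn l ≤ l[ki]'(by omega) := pvMn_le l _ (List.getElem_mem _)
  rcases lt_or_eq_of_le hmin with hlt | heq
  · exact Or.inl hlt
  · refine Or.inr ⟨heq, ?_⟩
    have hkik : ki ≤ k := by
      by_contra hc
      exact hklast ki (by omega) (by omega) heq.symm
    rw [hkeq]
    omega

-- pvFmi has the lexicographically greatest key among the examined indices
lemma key_fmi_max (x : Int) (t : List Int) (m : Nat) (h1 : 1 ≤ m) (h2 : m ≤ t.length + 1) :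
    ∀ i ∈ PySem.List.pyRange 0 (m : Int),
      pvKeyB (x :: t) i ≤ pvKeyB (x :: t) (pvFmi ((x :: t).take m)) := by
  intro i hi
  obtain ⟨ki, hki, rfl⟩ := mem_range_cases m i hi
  set l := (x :: t).take m with hl
  have hlne : l ≠ [] := by
    rcases m with _ | m
    · omega
    · simp [hl]
  have hllen : l.length = m := by simp [hl]; omega
  obtain ⟨k, hk, hkeq, hkv, hkfirst⟩ := fmi_props l hlne
  have hgi : PySem.List.pyGetD (x :: t) (ki : Int) 0 = l[ki]'(by omega) :=
    pvGet_take x t m ki hki h2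
  have hgk : PySem.List.pyGetD (x :: t) (pvFmi l) 0 = l[k]'hk := by
    rw [hkeq]
    exact pvGet_take x t m k (by omega) h2
  unfold pvKeyB
  rw [Prod.Lex.toLex_le_toLex]
  simp only [hgi, hgk, hkv]
  have hmax : l[ki]'(by omega) ≤ pvMx l := le_pvMx l _ (List.getElem_mem _)
  rcases lt_or_eq_of_le hmax with hlt | heq
  · exact Or.inl hlt
  · refine Or.inr ⟨heq, ?_⟩
    have hkik : k ≤ ki := by
      by_contra hc
      exact hkfirst ki (by omega) (by omega) heq
    rw [hkeq]
    omega

lemma lmi_mem_range (x : Int) (t : List Int) (m : Nat) (h1 : 1 ≤ m) (h2 : m ≤ t.length + 1) :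
    pvLmi ((x :: t).take m) ∈ PySem.List.pyRange 0 (m : Int) := by
  set l := (x :: t).take m with hl
  have hlne : l ≠ [] := by
    rcases m with _ | m
    · omega
    · simp [hl]
  have hllen : l.length = m := by simp [hl]; omega
  obtain ⟨k, hk, hkeq, -, -⟩ := lmi_props l hlne
  rw [hkeq, PySem.List.pyRange_zero_natCast]
  exact List.mem_map.mpr ⟨k, List.mem_range.mpr (by omega), rfl⟩

lemma fmi_mem_range (x : Int) (t : List Int) (m : Nat) (h1 : 1 ≤ m) (h2 : m ≤ t.length + 1) :
    pvFmi ((x :: t).take m) ∈ PySem.List.pyRange 0 (m : Int) := by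
  set l := (x :: t).take m with hl
  have hlne : l ≠ [] := by
    rcases m with _ | m
    · omega
    · simp [hl]
  have hllen : l.length = m := by simp [hl]; omega
  obtain ⟨k, hk, hkeq, -, -⟩ := fmi_props l hlne
  rw [hkeq, PySem.List.pyRange_zero_natCast]
  exact List.mem_map.mpr ⟨k, List.mem_range.mpr (by omega), rfl⟩

-- the two ends of B's sorted order are exactly pvLmi and pvFmi of the prefix
lemma sorted_ends (x : Int) (t : List Int) (m : Nat) (h1 : 1 ≤ m) (h2 : m ≤ t.length + 1) :
    (PySem.List.sorted (PySem.List.pyRange 0 (m : Int)) (pvKeyB (x :: t))).head?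
        = some (pvLmi ((x :: t).take m)) ∧
      (PySem.List.sorted (PySem.List.pyRange 0 (m : Int)) (pvKeyB (x :: t))).getLast?
        = some (pvFmi ((x :: t).take m)) := by
  set rng := PySem.List.pyRange 0 (m : Int) with hrng
  have hrne : rng ≠ [] := by
    rw [hrng, PySem.List.pyRange_zero_natCast]
    simp only [ne_eq, List.map_eq_nil_iff, List.range_eq_nil]
    omega
  set ord := PySem.List.sorted rng (pvKeyB (x :: t)) with hord
  have hone : ord ≠ [] := by
    rw [hord, Ne, PySem.List.sorted_eq_nil_iff]
    exact hrne
  obtain ⟨hd, tl, hcons⟩ := List.exists_cons_of_ne_nil hone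
  have hmemh : hd ∈ rng := by
    have : hd ∈ ord := by rw [hcons]; exact List.mem_cons_self
    exact (PySem.List.mem_sorted rng (pvKeyB (x :: t)) false hd).mp this
  have hhmin : ∀ y ∈ rng, pvKeyB (x :: t) hd ≤ pvKeyB (x :: t) y :=
    PySem.List.key_head_sorted_le rng (pvKeyB (x :: t)) (hord ▸ hcons)
  have hhead_eq : hd = pvLmi ((x :: t).take m) :=
    pvKeyB_inj (x :: t) _ _ (le_antisymm
      (hhmin _ (lmi_mem_range x t m h1 h2))
      (key_lmi_min x t m h1 h2 hd hmemh))
  have hlen1 : 1 ≤ ord.length := by rw [hcons]; simp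
  have hlt : ord.length - 1 < ord.length := by omega
  have hmemg : ord[ord.length - 1] ∈ rng := by
    have : ord[ord.length - 1] ∈ ord := List.getElem_mem hlt
    exact (PySem.List.mem_sorted rng (pvKeyB (x :: t)) false _).mp this
  have hmax : ∀ y ∈ rng, pvKeyB (x :: t) y ≤ pvKeyB (x :: t) ord[ord.length - 1] := by
    intro y hy
    have hy' : y ∈ ord := (PySem.List.mem_sorted rng (pvKeyB (x :: t)) false y).mpr hy
    obtain ⟨p, hp, hpe⟩ := List.mem_iff_getElem.mp hy'
    rw [← hpe]
    exact PySem.List.key_sorted_getElem_mono rng (pvKeyB (x :: t))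
      (p := p) (q := ord.length - 1) (by omega) hlt
  have hlast_eq : ord[ord.length - 1] = pvFmi ((x :: t).take m) :=
    pvKeyB_inj (x :: t) _ _ (le_antisymm
      (key_fmi_max x t m h1 h2 _ hmemg)
      (hmax _ (fmi_mem_range x t m h1 h2)))
  constructor
  · rw [hcons]
    simp [hhead_eq]
  · rw [List.getLast?_eq_getElem?, List.getElem?_eq_getElem hlt, hlast_eq]

-- ===== VERDICT (by name: the statement is the Claim_ definition above) =====
theorem minimum_seconds_to_lineup_spec : Claim_equal_minimum_seconds_to_lineup := by
  intro n heights _ hpre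
  obtain ⟨hne, hnlen⟩ := hpre
  unfold Spec_minimum_seconds_to_lineup
  rcases heights with _ | ⟨x, t⟩
  · exact absurd rfl hne
  unfold minimum_seconds_to_lineup minimum_seconds_to_lineup_alt
  have hget0 : PySem.List.pyGet? (x :: t) 0 = some x := by
    simp [PySem.List.pyGet?, PySem.List.pyIdx?]
  rw [hget0]
  by_cases hn : n ≤ 0
  · have hrA : PySem.List.pyRange 1 n = [] := PySem.List.pyRange_one_eq_nil (by omega)
    have hrB : PySem.List.pyRange 0 n = [] := pyRange_zero_nil n hn
    rw [hrA, sorted2_eq_sorted_toLex, hrB]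
    rfl
  · have hcast : ((n.toNat : Nat) : Int) = n := by omega
    have hm1 : 1 ≤ n.toNat := by omega
    have hm2 : n.toNat ≤ t.length + 1 := by simp at hnlen; omega
    have hkey : (fun i => toLex ((fun i => PySem.List.pyGetD (x :: t) i 0) i, (fun i : Int => -i) i))
        = pvKeyB (x :: t) := rfl
    rw [← hcast, sorted2_eq_sorted_toLex, hkey]
    obtain ⟨hhead, hlast⟩ := sorted_ends x t n.toNat hm1 hm2
    simp only [scan_inv x t n.toNat hm1 hm2, hhead, hlast]
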